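-- pv_equiv track=rewrite | github.com/natshabat/shabat_Python-for-DQEngineers-SELF-PACED-2025- | Homework_4.py | merge_dicts_with_index
-- ===== SOURCE A (Python) =====
-- def merge_dicts_with_index(dicts_list):
--     """
--     Merges a list of dictionaries and keeps the maximum value for each key,
--     along with the index of the dictionary from which the value was taken.
--
--     :param dicts_list: A list of dictionaries to merge
--     :return: A dictionary storing the maximum value for each key and the origin index
--     """
--     merged_dict = {}
--     for dict_index, current_dict in enumerate(dicts_list, start=1):
--         for key, value in current_dict.items():
--             if key not in merged_dict:
--                 # If the key is not yet in the merged dictionary, add it with its value and dictionary index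
--                 merged_dict[key] = (value, dict_index)
--             else:
--                 # If the key already exists, compare its value with the current one
--                 existing_value, existing_dict_index = merged_dict[key]
--                 if value > existing_value:
--                     # Update the dictionary with the new maximum value and its origin index
--                     merged_dict[key] = (value, dict_index)
--     return merged_dict
-- ===== SOURCE B (Python) =====
-- def merge_dicts_with_index(dicts_list):
--     # Collect-then-reduce: first group every (value, origin-index) pair by key,
--     # then take the first maximal pair per key in a second pass.
--     grouping = {}
--     for dict_index, current_dict in enumerate(dicts_list, start=1):
--         for key, value in current_dict.items():
--             grouping.setdefault(key, []).append((value, dict_index))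
--     merged = {}
--     for key, pairs in grouping.items():
--         merged[key] = max(pairs, key=lambda p: p[0])
--     return merged
-- ===== Notes on version B (the rewrite author's own statement) =====
-- stated objective: alternative
-- what changed: Replaces the in-place running-max update of the merged dict by a collect-then-reduce decomposition: one pass groups all (value, index) pairs per key, a second pass reduces each group with max (first maximal pair).
import Mathlib
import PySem

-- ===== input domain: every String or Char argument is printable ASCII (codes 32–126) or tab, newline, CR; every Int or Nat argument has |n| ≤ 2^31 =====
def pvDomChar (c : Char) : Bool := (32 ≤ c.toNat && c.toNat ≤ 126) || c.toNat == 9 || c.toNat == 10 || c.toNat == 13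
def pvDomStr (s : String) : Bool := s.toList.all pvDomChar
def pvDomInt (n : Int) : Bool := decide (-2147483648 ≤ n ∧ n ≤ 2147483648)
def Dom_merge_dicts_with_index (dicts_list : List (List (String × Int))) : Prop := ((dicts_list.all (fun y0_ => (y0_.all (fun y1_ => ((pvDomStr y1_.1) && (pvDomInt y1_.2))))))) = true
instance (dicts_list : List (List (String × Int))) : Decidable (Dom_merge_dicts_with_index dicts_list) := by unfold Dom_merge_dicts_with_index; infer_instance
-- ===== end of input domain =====

-- B replaces A's in-place running-max update by a collect-then-reduce decomposition
-- (group all (value, index) pairs per key, then take each group's first maximal pair).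


-- ===== PORT A =====
-- each inner association list stands for a Python dict: PySem.Dict.ofList is the dict it denotes
def merge_dicts_with_index (dicts_list : List (List (String × Int))) : List (String × Int × Int) :=
  let merged := (PySem.List.enumerate dicts_list 1).foldl
    (fun merged p =>
      (PySem.Dict.ofList p.2).items.foldl
        (fun merged kv =>
          if merged.contains kv.1 = false then
            merged.insert kv.1 (kv.2, p.1)
          else
            -- key is present, so getD returns exactly merged_dict[key]
            let ex := merged.getD kv.1 (0, 0)
            if kv.2 > ex.1 then merged.insert kv.1 (kv.2, p.1) else merged)
        merged)
    PySem.Dict.empty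
  merged.items

-- ===== PORT B =====
-- max(pairs, key=lambda p: p[0]): first maximal pair; pairs is never empty where B calls it
def pyMaxFst (l : List (Int × Int)) : Int × Int :=
  match l with
  | [] => (0, 0)
  | h :: t => t.foldl (fun best p => if p.1 > best.1 then p else best) h

def merge_dicts_with_index_alt (dicts_list : List (List (String × Int))) : List (String × Int × Int) :=
  let grouping := (PySem.List.enumerate dicts_list 1).foldl
    (fun g p =>
      (PySem.Dict.ofList p.2).items.foldl
        (fun g kv => g.modify kv.1 [] (fun l => l ++ [(kv.2, p.1)]))
        g)
    PySem.Dict.empty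
  let merged := grouping.items.foldl
    (fun m q => m.insert q.1 (pyMaxFst q.2)) PySem.Dict.empty
  merged.items

-- ===== PRECONDITION & SPEC =====
def Spec_merge_dicts_with_index (dicts_list : List (List (String × Int))) (out : List (String × Int × Int)) : Prop := out = merge_dicts_with_index_alt dicts_list
instance (dicts_list : List (List (String × Int))) (out : List (String × Int × Int)) : Decidable (Spec_merge_dicts_with_index dicts_list out) := by unfold Spec_merge_dicts_with_index; infer_instance

-- ===== CLAIM (what is proved, stated in full; the proofs are below) =====
def Claim_equal_merge_dicts_with_index : Prop := ∀ (dicts_list : List (List (String × Int))), Dom_merge_dicts_with_index dicts_list → Spec_merge_dicts_with_index dicts_list (merge_dicts_with_index dicts_list)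

-- ===== LEMMAS AND PROOFS =====

-- optMax [] = none; optMax l = some (first maximal) otherwise
def optMax (l : List (Int × Int)) : Option (Int × Int) :=
  match l with
  | [] => none
  | h :: t => some (pyMaxFst (h :: t))

-- the invariant linking A's running-max dict with B's grouping dict
def MInv (mA : PySem.Dict String (Int × Int)) (mB : PySem.Dict String (List (Int × Int))) : Prop :=
  mA.keys = mB.keys ∧ mA.keys.Nodup ∧ ∀ k, mA.get? k = optMax (mB.getD k [])

theorem optMax_append (b : Int × Int) (t : List (Int × Int)) (x : Int × Int) :
    optMax ((b :: t) ++ [x]) =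
      some (if x.1 > (pyMaxFst (b :: t)).1 then x else pyMaxFst (b :: t)) := by
  simp [optMax, pyMaxFst, List.foldl_append]

theorem Inv_step (i : Int) (kv : String × Int)
    (mA : PySem.Dict String (Int × Int)) (mB : PySem.Dict String (List (Int × Int)))
    (hinv : MInv mA mB) :
    MInv (if mA.contains kv.1 = false then mA.insert kv.1 (kv.2, i)
         else if kv.2 > (mA.getD kv.1 (0, 0)).1 then mA.insert kv.1 (kv.2, i) else mA)
        (mB.modify kv.1 [] (fun l => l ++ [(kv.2, i)])) := by
  obtain ⟨hkeys, hnd, hget⟩ := hinv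
  have hcont : mA.contains kv.1 = mB.contains kv.1 := by
    rw [PySem.Dict.contains_eq_decide_mem_keys, PySem.Dict.contains_eq_decide_mem_keys, hkeys]
  have hkeysB : (mB.modify kv.1 [] (fun l => l ++ [(kv.2, i)])).keys =
      (mB.insert kv.1 (mB.getD kv.1 [] ++ [(kv.2, i)])).keys :=
    PySem.Dict.keys_modify _ _ _ _
  cases hc : mA.contains kv.1 with
  | false =>
    have hnmem : kv.1 ∉ mA.keys := by
      have h := hc; rw [PySem.Dict.contains_eq_decide_mem_keys] at h; simpa using h
    have hnoneA : mA.get? kv.1 = none :=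
      (PySem.Dict.get?_eq_none_iff_not_mem_keys _ _).mpr hnmem
    have hBnil : mB.getD kv.1 [] = [] := by
      have h := hget kv.1; rw [hnoneA] at h
      cases hB : mB.getD kv.1 [] with
      | nil => rfl
      | cons a t => rw [hB] at h; simp [optMax] at h
    have hcB : mB.contains kv.1 = false := hcont ▸ hc
    rw [if_pos rfl]
    refine ⟨?_, ?_, ?_⟩
    · rw [PySem.Dict.keys_insert_of_not_contains _ _ hc, hkeysB,
          PySem.Dict.keys_insert_of_not_contains _ _ hcB, hkeys]
    · rw [PySem.Dict.keys_insert_of_not_contains _ _ hc]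
      simp only [List.nodup_append]
      exact ⟨hnd, List.nodup_singleton _, fun a ha => by simp; rintro rfl; exact hnmem ha⟩
    · intro k'
      rw [PySem.Dict.get?_insert, PySem.Dict.getD_modify]
      by_cases hk : k' = kv.1
      · rw [if_pos hk, if_pos hk, hBnil]
        simp [optMax, pyMaxFst]
      · rw [if_neg hk, if_neg hk, hget k']
  | true =>
    have hsome : ∃ ex, mA.get? kv.1 = some ex := by
      cases hA : mA.get? kv.1 with
      | none =>
        rw [PySem.Dict.get?_eq_none_iff_not_mem_keys] at hA
        rw [PySem.Dict.contains_eq_decide_mem_keys] at hc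
        simp at hc; exact absurd hc hA
      | some ex => exact ⟨ex, rfl⟩
    obtain ⟨ex, hex⟩ := hsome
    have hgetDA : mA.getD kv.1 (0, 0) = ex := PySem.Dict.getD_of_get?_eq_some _ _ hex
    obtain ⟨b, t, hBl⟩ : ∃ b t, mB.getD kv.1 [] = b :: t := by
      have h := hget kv.1; rw [hex] at h
      cases hB : mB.getD kv.1 [] with
      | nil => rw [hB] at h; simp [optMax] at h
      | cons b t => exact ⟨b, t, rfl⟩
    have hexMax : ex = pyMaxFst (b :: t) := by
      have h := hget kv.1; rw [hex, hBl] at h; simpa [optMax] using h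
    have hcB : mB.contains kv.1 = true := hcont ▸ hc
    have hkeysB' : (mB.modify kv.1 [] (fun l => l ++ [(kv.2, i)])).keys = mB.keys := by
      rw [hkeysB, PySem.Dict.keys_insert_of_contains _ _ hcB]
    have hgetB : ∀ k', (mB.modify kv.1 [] (fun l => l ++ [(kv.2, i)])).getD k' [] =
        if k' = kv.1 then (b :: t) ++ [(kv.2, i)] else mB.getD k' [] := by
      intro k'; rw [PySem.Dict.getD_modify]
      by_cases hk : k' = kv.1
      · rw [if_pos hk, if_pos hk, hBl]
      · rw [if_neg hk, if_neg hk]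
    rw [if_neg (by simp), hgetDA]
    by_cases hv : kv.2 > ex.1
    · rw [if_pos hv]
      refine ⟨?_, ?_, ?_⟩
      · rw [PySem.Dict.keys_insert_of_contains _ _ hc, hkeysB', hkeys]
      · rw [PySem.Dict.keys_insert_of_contains _ _ hc]; exact hnd
      · intro k'
        rw [PySem.Dict.get?_insert, hgetB k']
        by_cases hk : k' = kv.1
        · rw [if_pos hk, if_pos hk, optMax_append, ← hexMax, if_pos hv]
        · rw [if_neg hk, if_neg hk, hget k']
    · rw [if_neg hv]
      refine ⟨?_, ?_, ?_⟩
      · rw [hkeysB', hkeys]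
      · exact hnd
      · intro k'
        rw [hgetB k']
        by_cases hk : k' = kv.1
        · rw [if_pos hk, optMax_append, ← hexMax, if_neg hv, hk, hex, hexMax]
        · rw [if_neg hk, hget k']

theorem Inv_foldl (i : Int) (l : List (String × Int))
    (mA : PySem.Dict String (Int × Int)) (mB : PySem.Dict String (List (Int × Int)))
    (hinv : MInv mA mB) :
    MInv (l.foldl (fun m kv =>
          if m.contains kv.1 = false then m.insert kv.1 (kv.2, i)
          else if kv.2 > (m.getD kv.1 (0, 0)).1 then m.insert kv.1 (kv.2, i) else m) mA)
        (l.foldl (fun g kv => g.modify kv.1 [] (fun l => l ++ [(kv.2, i)])) mB) := by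
  induction l generalizing mA mB with
  | nil => exact hinv
  | cons kv t ih => exact ih _ _ (Inv_step i kv mA mB hinv)

theorem Inv_outer (L : List (Int × List (String × Int)))
    (mA : PySem.Dict String (Int × Int)) (mB : PySem.Dict String (List (Int × Int)))
    (hinv : MInv mA mB) :
    MInv (L.foldl (fun m p => (PySem.Dict.ofList p.2).items.foldl
          (fun m kv =>
            if m.contains kv.1 = false then m.insert kv.1 (kv.2, p.1)
            else if kv.2 > (m.getD kv.1 (0, 0)).1 then m.insert kv.1 (kv.2, p.1) else m) m) mA)
        (L.foldl (fun g p => (PySem.Dict.ofList p.2).items.foldl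
          (fun g kv => g.modify kv.1 [] (fun l => l ++ [(kv.2, p.1)])) g) mB) := by
  induction L generalizing mA mB with
  | nil => exact hinv
  | cons p t ih => exact ih _ _ (Inv_foldl p.1 _ mA mB hinv)

-- ===== VERDICT (by name: the statement is the Claim_ definition above) =====
theorem merge_dicts_with_index_spec : Claim_equal_merge_dicts_with_index := by
  intro dicts_list _
  unfold Spec_merge_dicts_with_index merge_dicts_with_index merge_dicts_with_index_alt
  obtain ⟨hkeys, hnd, hget⟩ := Inv_outer (PySem.List.enumerate dicts_list 1)
    PySem.Dict.empty PySem.Dict.empty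
    ⟨rfl, by simp [PySem.Dict.keys_empty], fun k => by simp [PySem.Dict.get?_empty, PySem.Dict.getD_empty, optMax]⟩
  set mA := (PySem.List.enumerate dicts_list 1).foldl _ PySem.Dict.empty with hmA
  set gB := (PySem.List.enumerate dicts_list 1).foldl _ PySem.Dict.empty with hgB
  have hndB : (gB.items.map (fun q => q.1)).Nodup := by
    have : gB.items.map (fun q => q.1) = gB.keys := rfl
    rw [this, ← hkeys]; exact hnd
  rw [PySem.Dict.items_foldl_insert_fresh gB.items (fun q => q.1) (fun q => pyMaxFst q.2)
    PySem.Dict.empty (fun a _ => PySem.Dict.contains_empty _) hndB]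
  rw [PySem.Dict.items_eq_map_keys mA hnd (0, 0),
      PySem.Dict.items_eq_map_keys gB (hkeys ▸ hnd) ([] : List (Int × Int))]
  simp only [show (PySem.Dict.empty : PySem.Dict String (Int × Int)).items = [] from rfl,
    List.nil_append, List.map_map, hkeys]
  apply List.map_congr_left
  intro k hk
  simp only [Function.comp]
  have hsome : ∃ ex, mA.get? k = some ex := by
    cases hA : mA.get? k with
    | none =>
      rw [PySem.Dict.get?_eq_none_iff_not_mem_keys] at hA
      exact absurd (hkeys ▸ hk) hA
    | some ex => exact ⟨ex, rfl⟩
  obtain ⟨ex, hex⟩ := hsome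
  have h := hget k; rw [hex] at h
  cases hB : gB.getD k [] with
  | nil => rw [hB] at h; simp [optMax] at h
  | cons b t =>
    rw [hB] at h
    have : ex = pyMaxFst (b :: t) := by simpa [optMax] using h
    rw [PySem.Dict.getD_of_get?_eq_some _ _ hex, this]
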